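-- pv_equiv track=rewrite | github.com/jinny0909/GenomicsTeam48 | openRF.py | bestFrame
-- ===== SOURCE A (Python) =====
-- def longestORF(seq):
--   longest = 0
--   current = 0
--   for c in seq:
--     if c == "*":
--       if current > longest:
--         longest = current
--       current = 0
--     else:
--       current += 1
--   if current > longest:
--     longest = current
--
--   return longest
--
-- def bestFrame(seqs):
--   best = []
--   longest = 0
--   for s in seqs:
--     ORF = longestORF(s)
--     if ORF > longest:
--       best.append(s)
--       longest = ORF
--     elif abs(ORF - longest) <= 1:
--       best.append(s)
--   return best
-- ===== SOURCE B (Python) =====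
-- def longestORF(seq):
--   return max(len(part) for part in seq.split('*'))
--
-- def bestFrame(seqs):
--   orfs = [longestORF(s) for s in seqs]
--   prefmax = []
--   m = 0
--   for o in orfs:
--     prefmax.append(m)
--     m = max(m, o)
--   return [s for s, o, p in zip(seqs, orfs, prefmax) if o >= p - 1]
-- ===== Notes on version B (the rewrite author's own statement) =====
-- stated objective: alternative
-- what changed: longestORF is rewritten as max over the lengths of the '*'-split parts instead of a running counter reset at each stop codon, and bestFrame is rewritten as a single zip/filter against a precomputed prefix-maximum list (keep iff ORF >= prevmax - 1) instead of a stateful append loop with two branches.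
import Mathlib
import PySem

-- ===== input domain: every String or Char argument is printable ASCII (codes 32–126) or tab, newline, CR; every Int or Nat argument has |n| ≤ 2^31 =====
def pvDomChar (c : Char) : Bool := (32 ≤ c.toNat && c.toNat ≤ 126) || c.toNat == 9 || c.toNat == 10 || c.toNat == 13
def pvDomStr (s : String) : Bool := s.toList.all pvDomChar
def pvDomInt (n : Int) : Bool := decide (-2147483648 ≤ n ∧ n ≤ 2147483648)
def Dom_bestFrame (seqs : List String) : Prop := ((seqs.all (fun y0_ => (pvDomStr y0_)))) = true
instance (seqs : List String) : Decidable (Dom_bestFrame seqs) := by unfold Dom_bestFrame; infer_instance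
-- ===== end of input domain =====

-- B rewrites longestORF as max over the '*'-split part lengths and bestFrame as a
-- zip/filter against a precomputed prefix-maximum list (alternative decomposition, same cost).

-- ===== PORT A =====
-- running (longest, current) counter over the characters, reset at '*'
def stepORF (p : Int × Int) (c : Char) : Int × Int :=
  if c = '*' then ((if p.2 > p.1 then p.2 else p.1), 0) else (p.1, p.2 + 1)

def longestORF (s : String) : Int :=
  let st := s.toList.foldl stepORF (0, 0)
  if st.2 > st.1 then st.2 else st.1

def stepBF (st : List String × Int) (s : String) : List String × Int :=
  let ORF := longestORF s
  if ORF > st.2 then (st.1 ++ [s], ORF)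
  else if |ORF - st.2| ≤ 1 then (st.1 ++ [s], st.2)
  else st

def bestFrame (seqs : List String) : List String :=
  (seqs.foldl stepBF ([], 0)).1

-- ===== PORT B =====
-- max(len(part) for part in seq.split('*')); split('*') is never empty, so the
-- `.getD 0` default of Python's max over a nonempty sequence is unreachable.
def longestORF_alt (s : String) : Int :=
  (PySem.List.max? ((PySem.Chars.splitOn s.toList "*".toList).map (fun p => (p.length : Int)))
    (fun y => y)).getD 0

def stepPM (st : List Int × Int) (o : Int) : List Int × Int :=
  (st.1 ++ [st.2], max st.2 o)

def bestFrame_alt (seqs : List String) : List String :=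
  let orfs := seqs.map longestORF_alt
  let prefmax := (orfs.foldl stepPM ([], 0)).1
  ((seqs.zip (orfs.zip prefmax)).filter (fun t => t.2.1 ≥ t.2.2 - 1)).map (fun t => t.1)

-- ===== PRECONDITION & SPEC =====
def Spec_bestFrame (seqs : List String) (out : List String) : Prop := out = bestFrame_alt seqs
instance (seqs : List String) (out : List String) : Decidable (Spec_bestFrame seqs out) := by unfold Spec_bestFrame; infer_instance

-- ===== CLAIM (what is proved, stated in full; the proofs are below) =====
def Claim_equal_bestFrame : Prop := ∀ (seqs : List String), Dom_bestFrame seqs → Spec_bestFrame seqs (bestFrame seqs)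

-- ===== LEMMAS AND PROOFS =====

-- pure characterization of splitting a char list at '*'
def splitCur : List Char → List Char → List (List Char)
  | [], cur => [cur.reverse]
  | c :: t, cur => if c = '*' then cur.reverse :: splitCur t [] else splitCur t (c :: cur)

-- "max with current run": the value A's loop computes
def mwc : List Char → Int → Int
  | [], C => C
  | c :: t, C => if c = '*' then max C (mwc t 0) else mwc t (C + 1)

lemma splitOn_go_eq (l : List Char) : ∀ (fuel : Nat) (cur : List Char) (acc : List (List Char)),
    l.length < fuel →
    PySem.Chars.splitOn.go ['*'] fuel l cur acc = acc.reverse ++ splitCur l cur := by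
  induction l with
  | nil =>
    intro fuel cur acc h
    rw [PySem.Chars.splitOn.go.eq_def]
    cases fuel with
    | zero => omega
    | succ f => simp [splitCur]
  | cons c t ih =>
    intro fuel cur acc h
    rw [PySem.Chars.splitOn.go.eq_def]
    cases fuel with
    | zero => simp at h
    | succ f =>
      by_cases hc : c = '*'
      · subst hc
        have hpre : List.isPrefixOf ['*'] ('*' :: t) = true := by simp [List.isPrefixOf]
        simp only [hpre, if_pos]
        rw [show List.drop (['*'].length) ('*' :: t) = t from rfl]
        rw [ih f [] (cur.reverse :: acc) (by simp at h ⊢; omega)]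
        simp [splitCur]
      · have hpre : List.isPrefixOf ['*'] (c :: t) = false := by
          simp only [List.isPrefixOf, Bool.and_eq_false_iff, beq_eq_false_iff_ne]
          exact Or.inl (Ne.symm hc)
        simp only [hpre, Bool.false_eq_true, if_neg, not_false_eq_true]
        rw [ih f (c :: cur) acc (by simp at h ⊢; omega)]
        simp [splitCur, hc]

lemma splitOn_eq_splitCur (l : List Char) :
    PySem.Chars.splitOn l ['*'] = splitCur l [] := by
  have := splitOn_go_eq l (l.length + 1) [] [] (by omega)
  simpa [PySem.Chars.splitOn] using this

lemma le_mwc (l : List Char) : ∀ C : Int, C ≤ mwc l C := by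
  induction l with
  | nil => intro C; simp [mwc]
  | cons c t ih =>
    intro C
    by_cases hc : c = '*'
    · simp [mwc, hc]
    · simp only [mwc, hc, if_false]
      have := ih (C + 1); omega

lemma foldl_max_shift (xs : List Int) : ∀ a b : Int, xs.foldl max (max a b) = max a (xs.foldl max b) := by
  induction xs with
  | nil => intro a b; simp
  | cons x xs ih => intro a b; simp only [List.foldl_cons, max_assoc, ih]

-- the head/rest shape of the split-part lengths, and their running max = mwc
lemma maxlens_splitCur (l : List Char) : ∀ cur : List Char,
    ∃ (a : Int) (rest : List Int),
      (splitCur l cur).map (fun p => (p.length : Int)) = a :: rest ∧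
      rest.foldl max a = mwc l cur.length := by
  induction l with
  | nil => intro cur; exact ⟨(cur.reverse.length : Int), [], by simp [splitCur], by simp [mwc]⟩
  | cons c t ih =>
    intro cur
    by_cases hc : c = '*'
    · subst hc
      obtain ⟨a0, rest0, h1, h2⟩ := ih []
      refine ⟨(cur.reverse.length : Int), a0 :: rest0, by simp [splitCur, h1], ?_⟩
      simp only [List.length_nil, Nat.cast_zero] at h2
      rw [List.foldl_cons, foldl_max_shift rest0 _ a0, h2]
      simp [mwc]
    · obtain ⟨a, rest, h1, h2⟩ := ih (c :: cur)
      refine ⟨a, rest, by simpa [splitCur, hc] using h1, ?_⟩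
      rw [h2]
      have hm : mwc (c :: t) (cur.length : Int) = mwc t ((cur.length : Int) + 1) := by
        simp [mwc, hc]
      rw [hm]
      congr 1

lemma longestORF_eq_mwc_aux (l : List Char) : ∀ (L C : Int),
    (if (l.foldl stepORF (L, C)).2 > (l.foldl stepORF (L, C)).1
      then (l.foldl stepORF (L, C)).2 else (l.foldl stepORF (L, C)).1) = max L (mwc l C) := by
  induction l with
  | nil =>
    intro L C
    simp only [List.foldl_nil, mwc, max_def]
    split_ifs <;> omega
  | cons c t ih =>
    intro L C
    by_cases hc : c = '*'
    · have hstep : stepORF (L, C) c = ((if C > L then C else L), 0) := by simp [stepORF, hc]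
      have hm : mwc (c :: t) C = max C (mwc t 0) := by simp [mwc, hc]
      simp only [List.foldl_cons, hstep, hm]
      rw [ih (if C > L then C else L) 0,
        show (if C > L then C else L) = max L C by rw [max_def]; split_ifs <;> omega, max_assoc]
    · have hstep : stepORF (L, C) c = (L, C + 1) := by simp [stepORF, hc]
      have hm : mwc (c :: t) C = mwc t (C + 1) := by simp [mwc, hc]
      simp only [List.foldl_cons, hstep, hm]
      exact ih L (C + 1)

lemma longestORF_eq (s : String) : longestORF s = longestORF_alt s := by
  have hA : longestORF s =
      (if (s.toList.foldl stepORF (0, 0)).2 > (s.toList.foldl stepORF (0, 0)).1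
        then (s.toList.foldl stepORF (0, 0)).2 else (s.toList.foldl stepORF (0, 0)).1) := rfl
  unfold longestORF_alt
  rw [hA, longestORF_eq_mwc_aux s.toList 0 0,
    show "*".toList = ['*'] from rfl, splitOn_eq_splitCur]
  obtain ⟨a, rest, h1, h2⟩ := maxlens_splitCur s.toList []
  rw [h1, PySem.List.max?_id_cons]
  simp only [List.length_nil, Nat.cast_zero] at h2
  simp only [Option.getD_some, h2]
  have := le_mwc s.toList 0
  omega

-- the common reference recursion: keep s iff its ORF is ≥ runningMax - 1
def gosel : List String → Int → List String
  | [], _ => []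
  | s :: t, L =>
    (if longestORF_alt s ≥ L - 1 then [s] else []) ++ gosel t (max L (longestORF_alt s))

lemma bestFrame_fold_eq (seqs : List String) : ∀ (best : List String) (L : Int),
    (seqs.foldl stepBF (best, L)).1 = best ++ gosel seqs L := by
  induction seqs with
  | nil => intro best L; simp [gosel]
  | cons s t ih =>
    intro best L
    simp only [List.foldl_cons, gosel, stepBF, longestORF_eq s]
    set o := longestORF_alt s with ho
    by_cases h1 : o > L
    · have hsel : o ≥ L - 1 := by omega
      have hmax : max L o = o := by rw [max_def]; split_ifs <;> omega
      simp only [if_pos h1, ih, hsel, if_pos, hmax, List.append_assoc, List.singleton_append]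
    · have hmax : max L o = L := by rw [max_def]; split_ifs <;> omega
      simp only [if_neg h1]
      by_cases h2 : |o - L| ≤ 1
      · have hsel : o ≥ L - 1 := by
          rcases abs_le.mp h2 with ⟨hl, _⟩; omega
        simp only [if_pos h2, ih, hsel, if_pos, hmax, List.append_assoc, List.singleton_append]
      · have hsel : ¬ o ≥ L - 1 := by
          intro hg; apply h2; rw [abs_le]; constructor <;> omega
        simp only [if_neg h2, ih, hsel, if_neg, hmax, List.nil_append, not_false_eq_true]

-- prefix maxima starting from m
def pm : List Int → Int → List Int
  | [], _ => []
  | o :: t, m => m :: pm t (max m o)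

lemma prefmax_fold_eq (orfs : List Int) : ∀ (acc : List Int) (m : Int),
    (orfs.foldl stepPM (acc, m)).1 = acc ++ pm orfs m := by
  induction orfs with
  | nil => intro acc m; simp [pm]
  | cons o t ih =>
    intro acc m
    simp only [List.foldl_cons, stepPM, ih, pm, List.append_assoc, List.singleton_append]

lemma zipfilter_eq_gosel (seqs : List String) : ∀ (m : Int),
    (((seqs.zip ((seqs.map longestORF_alt).zip (pm (seqs.map longestORF_alt) m))).filter
        (fun t => t.2.1 ≥ t.2.2 - 1)).map (fun t => t.1)) = gosel seqs m := by
  induction seqs with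
  | nil => intro m; simp [gosel]
  | cons s t ih =>
    intro m
    simp only [List.map_cons, pm, List.zip_cons_cons, List.filter_cons, gosel]
    by_cases h : longestORF_alt s ≥ m - 1
    · simp only [h, if_pos, List.map_cons, ih, decide_true, List.singleton_append, max_comm m]
    · simp only [h, if_neg, List.nil_append, not_false_eq_true, decide_false, Bool.false_eq_true,
        ih, max_comm m]

lemma bestFrame_alt_unfold (seqs : List String) :
    bestFrame_alt seqs =
      ((seqs.zip ((seqs.map longestORF_alt).zip
          (((seqs.map longestORF_alt).foldl stepPM ([], 0)).1))).filter
        (fun t => t.2.1 ≥ t.2.2 - 1)).map (fun t => t.1) := rfl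

-- ===== VERDICT (by name: the statement is the Claim_ definition above) =====
theorem bestFrame_spec : Claim_equal_bestFrame := by
  intro seqs _
  unfold Spec_bestFrame bestFrame
  rw [bestFrame_alt_unfold, bestFrame_fold_eq seqs [] 0,
    prefmax_fold_eq (seqs.map longestORF_alt) [] 0]
  simp only [List.nil_append]
  rw [zipfilter_eq_gosel seqs 0]
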